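-- pv_equiv track=rewrite | github.com/SID-Devu/AMD-AI-Compute-Observatory | aaco/compiler/graph_analyzer.py | _find_sequence_matches
-- ===== SOURCE A (Python) =====
-- from typing import Optional, Dict, Any, List, Tuple
--
-- def _find_sequence_matches(sequence: List[str], pattern: List[str]) -> List[List[int]]:
--     """Find pattern matches in sequence (supports | for alternatives)."""
--     matches = []
--
--     for i in range(len(sequence) - len(pattern) + 1):
--         matched = True
--         match_indices = []
--
--         for j, pat in enumerate(pattern):
--             alternatives = pat.split("|")
--             if sequence[i + j] in alternatives:
--                 match_indices.append(i + j)
--             else: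
--                 matched = False
--                 break
--
--         if matched:
--             matches.append(match_indices)
--
--     return matches
-- ===== SOURCE B (Python) =====
-- def _find_sequence_matches(sequence, pattern):
--     """Column-sieve re-implementation: filter candidate starts per pattern position."""
--     m = len(pattern)
--     starts = list(range(len(sequence) - m + 1))
--     for j, pat in enumerate(pattern):
--         alts = set(pat.split("|"))
--         starts = [s for s in starts if sequence[s + j] in alts]
--     return [list(range(s, s + m)) for s in starts]
-- ===== Notes on version B (the rewrite author's own statement) =====
-- stated objective: alternative
-- what changed: Transposed the traversal: instead of scanning each window with an inner per-position loop and break, B sieves the list of candidate start positions column by column (one pass over the sequence-aligned candidates per pattern position, with each column's alternatives put in a set once), then emits range(s, s+m) for the survivors.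
import Mathlib
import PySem

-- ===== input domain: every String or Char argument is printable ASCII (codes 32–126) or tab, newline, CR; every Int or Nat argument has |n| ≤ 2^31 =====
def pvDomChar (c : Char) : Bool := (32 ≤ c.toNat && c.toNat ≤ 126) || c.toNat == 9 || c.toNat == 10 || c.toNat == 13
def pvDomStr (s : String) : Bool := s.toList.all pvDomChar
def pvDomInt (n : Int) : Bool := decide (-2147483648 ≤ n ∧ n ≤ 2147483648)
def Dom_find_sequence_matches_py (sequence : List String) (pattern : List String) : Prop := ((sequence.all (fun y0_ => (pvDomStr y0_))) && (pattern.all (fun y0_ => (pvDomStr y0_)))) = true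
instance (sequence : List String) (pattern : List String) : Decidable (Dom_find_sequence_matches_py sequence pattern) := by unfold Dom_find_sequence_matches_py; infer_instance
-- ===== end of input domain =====

-- B transposes the traversal (per-pattern-column sieve over candidate starts instead of a
-- per-window inner scan with break); same results, no speed claim.

-- ===== PORT A =====
-- sequence[i + j] is always in range inside A's loops (0 ≤ i ≤ n-m, 0 ≤ j < m), so pyGetD
-- with a junk default is exact here.
def find_sequence_matches_py (sequence : List String) (pattern : List String) : List (List Int) :=
  (PySem.List.pyRange 0 ((sequence.length : Int) - (pattern.length : Int) + 1) 1).foldl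
    (fun acc i =>
      -- inner loop over enumerate(pattern); the Bool is `matched`, break modelled by the
      -- state freezing once `matched` is false
      let r := (PySem.List.enumerate pattern 0).foldl
        (fun (st : Bool × List Int) jp =>
          if st.1 then
            let alternatives := ((PySem.Str.split? jp.2 "|").getD [])
            if PySem.List.pyGetD sequence (i + jp.1) "" ∈ alternatives then
              (true, st.2 ++ [i + jp.1])
            else
              (false, st.2)
          else st)
        (true, ([] : List Int))
      if r.1 then acc ++ [r.2] else acc)
    []

-- ===== PORT B =====
def find_sequence_matches_py_alt (sequence : List String) (pattern : List String) : List (List Int) :=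
  let m : Int := (pattern.length : Int)
  let starts0 := PySem.List.pyRange 0 ((sequence.length : Int) - m + 1) 1
  let starts := (PySem.List.enumerate pattern 0).foldl
    (fun starts jp =>
      let alts : PySem.Set String := PySem.Set.ofList (((PySem.Str.split? jp.2 "|").getD []))
      starts.filter (fun s => PySem.Set.contains alts (PySem.List.pyGetD sequence (s + jp.1) "")))
    starts0
  starts.map (fun s => PySem.List.pyRange s (s + m) 1)

-- ===== PRECONDITION & SPEC =====
def Spec_find_sequence_matches_py (sequence : List String) (pattern : List String) (out : List (List Int)) : Prop := out = find_sequence_matches_py_alt sequence pattern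
instance (sequence : List String) (pattern : List String) (out : List (List Int)) : Decidable (Spec_find_sequence_matches_py sequence pattern out) := by unfold Spec_find_sequence_matches_py; infer_instance

-- ===== CLAIM (what is proved, stated in full; the proofs are below) =====
def Claim_equal_find_sequence_matches_py : Prop := ∀ (sequence : List String) (pattern : List String), Dom_find_sequence_matches_py sequence pattern → Spec_find_sequence_matches_py sequence pattern (find_sequence_matches_py sequence pattern)

-- ===== LEMMAS AND PROOFS =====

-- proof-only name for A's inner-loop step (definitionally the lambda in the port)
def stepA (sequence : List String) (i : Int) (st : Bool × List Int) (jp : Int × String) : Bool × List Int :=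
  if st.1 then
    let alternatives := ((PySem.Str.split? jp.2 "|").getD [])
    if PySem.List.pyGetD sequence (i + jp.1) "" ∈ alternatives then
      (true, st.2 ++ [i + jp.1])
    else
      (false, st.2)
  else st

-- proof-only name for B's per-column membership test (definitionally the lambda in the port)
def testB (sequence : List String) (jp : Int × String) (s : Int) : Bool :=
  PySem.Set.contains (PySem.Set.ofList ((PySem.Str.split? jp.2 "|").getD []))
    (PySem.List.pyGetD sequence (s + jp.1) "")

-- once `matched` is false the state is frozen (Python's break)
theorem innerA_frozen (sequence : List String) (i : Int) :
    ∀ (l : List (Int × String)) (mi : List Int),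
      l.foldl (stepA sequence i) (false, mi) = (false, mi) := by
  intro l mi
  induction l with
  | nil => rfl
  | cons a l ih => simpa [stepA] using ih

-- A's inner loop, characterised: the Bool is the conjunction of the per-position tests, and
-- when it is true the collected indices are the window i+s, …, i+s+|ps|-1.
theorem innerA_char (sequence : List String) (i : Int) :
    ∀ (ps : List String) (s : Int) (mi : List Int),
      ((PySem.List.enumerate ps s).foldl (stepA sequence i) (true, mi)).1
      = (PySem.List.enumerate ps s).all
          (fun jp => decide (PySem.List.pyGetD sequence (i + jp.1) "" ∈ ((PySem.Str.split? jp.2 "|").getD [])))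
    ∧ (((PySem.List.enumerate ps s).all
          (fun jp => decide (PySem.List.pyGetD sequence (i + jp.1) "" ∈ ((PySem.Str.split? jp.2 "|").getD [])))) = true →
        ((PySem.List.enumerate ps s).foldl (stepA sequence i) (true, mi)).2
          = mi ++ PySem.List.pyRange (i + s) (i + s + ps.length) 1) := by
  intro ps
  induction ps with
  | nil =>
    intro s mi
    refine ⟨rfl, fun _ => ?_⟩
    rw [PySem.List.pyRange_one_eq_nil (by simp)]
    simp [PySem.List.enumerate]
  | cons p ps ih =>
    intro s mi
    rw [PySem.List.enumerate_cons, List.foldl_cons]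
    by_cases h : PySem.List.pyGetD sequence (i + s) "" ∈ ((PySem.Str.split? p "|").getD [])
    · have hstep : stepA sequence i (true, mi) (s, p) = (true, mi ++ [i + s]) := by
        simp [stepA, h]
      rw [hstep]
      constructor
      · rw [(ih (s + 1) (mi ++ [i + s])).1]
        simp [h]
      · intro hall
        simp only [List.all_cons, h, decide_true, Bool.true_and] at hall
        rw [(ih (s + 1) (mi ++ [i + s])).2 hall]
        rw [PySem.List.pyRange_one_cons (a := i + s) (b := i + s + ((p :: ps).length : Int))
              (by simp only [List.length_cons]; push_cast; omega)]
        have e2 : i + (s + 1) + (ps.length : Int) = i + s + ((p :: ps).length : Int) := by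
          simp only [List.length_cons]; push_cast; ring
        have e1 : i + (s + 1) = i + s + 1 := by ring
        rw [e2, e1]
        simp [List.append_assoc]
    · have hstep : stepA sequence i (true, mi) (s, p) = (false, mi) := by
        simp [stepA, h]
      rw [hstep, innerA_frozen]
      constructor
      · simp [h]
      · intro hall
        simp [h] at hall

-- B's fold of filters is one filter by the conjunction of the tests
theorem foldl_filter_all {α β : Type} (q : β → α → Bool) :
    ∀ (l : List β) (xs : List α),
      l.foldl (fun st jp => st.filter (q jp)) xs = xs.filter (fun s => l.all (fun jp => q jp s)) := by
  intro l
  induction l with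
  | nil => simp
  | cons a l ih =>
    intro xs
    rw [List.foldl_cons, ih, List.filter_filter]
    exact List.filter_congr (fun x _ => Bool.and_comm _ _)

-- the two per-position tests coincide (set membership vs list membership)
theorem testB_eq (sequence : List String) (i : Int) (jp : Int × String) :
    testB sequence jp i
      = decide (PySem.List.pyGetD sequence (i + jp.1) "" ∈ ((PySem.Str.split? jp.2 "|").getD [])) := by
  simp [testB, PySem.Set.contains_eq_listContains, PySem.Set.mem_ofList]

-- ===== VERDICT (by name: the statement is the Claim_ definition above) =====
theorem find_sequence_matches_py_spec : Claim_equal_find_sequence_matches_py := by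
  intro sequence pattern _
  unfold Spec_find_sequence_matches_py
  show (PySem.List.pyRange 0 ((sequence.length : Int) - (pattern.length : Int) + 1) 1).foldl
      (fun acc i =>
        if ((PySem.List.enumerate pattern 0).foldl (stepA sequence i) (true, ([] : List Int))).1 then
          acc ++ [((PySem.List.enumerate pattern 0).foldl (stepA sequence i) (true, ([] : List Int))).2]
        else acc) []
    = ((PySem.List.enumerate pattern 0).foldl
        (fun starts jp => starts.filter (testB sequence jp))
        (PySem.List.pyRange 0 ((sequence.length : Int) - (pattern.length : Int) + 1) 1)).map
        (fun s => PySem.List.pyRange s (s + (pattern.length : Int)) 1)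
  rw [foldl_filter_all, PySem.List.foldl_append_if, List.nil_append]
  have hfil : (PySem.List.pyRange 0 ((sequence.length : Int) - (pattern.length : Int) + 1) 1).filter
      (fun i => ((PySem.List.enumerate pattern 0).foldl (stepA sequence i) (true, ([] : List Int))).1)
    = (PySem.List.pyRange 0 ((sequence.length : Int) - (pattern.length : Int) + 1) 1).filter
      (fun s => (PySem.List.enumerate pattern 0).all (fun jp => testB sequence jp s)) := by
    refine List.filter_congr (fun i _ => ?_)
    rw [(innerA_char sequence i pattern 0 []).1]
    simp only [testB_eq]
  rw [hfil]
  refine List.map_congr_left (fun i hi => ?_)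
  have hall : (PySem.List.enumerate pattern 0).all
      (fun jp => decide (PySem.List.pyGetD sequence (i + jp.1) "" ∈ ((PySem.Str.split? jp.2 "|").getD []))) = true := by
    have h2 := (List.mem_filter.mp hi).2
    simpa only [testB_eq] using h2
  rw [(innerA_char sequence i pattern 0 []).2 hall]
  simp
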